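-- pv_equiv track=rewrite | github.com/EstamelGG/EveSDE_2.0 | tools/system_ranges.py | _categorize_by_jumps
-- ===== SOURCE A (Python) =====
-- from typing import Dict, List, Set, Tuple
--
-- def _categorize_by_jumps(
--     jump_distances: Dict[int, int],
--     all_target_systems: Set[int]
-- ) -> Dict[str, List[int]]:
--     """
--     按跳数范围分类星系
--
--     Args:
--         jump_distances: 星系ID -> 跳数字典
--         all_target_systems: 目标星域内的所有星系集合
--
--     Returns:
--         Dict[str, List[int]]: 按跳数范围分类的星系ID列表
--     """
--     result = {
--         "<=1": [],
--         "<=2": [],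
--         "<=3": [],
--         "<=4": [],
--         "<=5": [],
--         "<=10": [],
--         "<=20": [],
--         "<=30": [],
--         "<=40": [],
--         "all": list(all_target_systems)
--     }
--
--     # 按跳数分类
--     for system_id, jumps in jump_distances.items():
--         if jumps <= 1:
--             result["<=1"].append(system_id)
--         if jumps <= 2:
--             result["<=2"].append(system_id)
--         if jumps <= 3:
--             result["<=3"].append(system_id)
--         if jumps <= 4:
--             result["<=4"].append(system_id)
--         if jumps <= 5:
--             result["<=5"].append(system_id)
--         if jumps <= 10:
--             result["<=10"].append(system_id)
--         if jumps <= 20: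
--             result["<=20"].append(system_id)
--         if jumps <= 30:
--             result["<=30"].append(system_id)
--         if jumps <= 40:
--             result["<=40"].append(system_id)
--
--     # 对每个列表进行排序
--     for key in result:
--         result[key].sort()
--
--     return result
-- ===== SOURCE B (Python) =====
-- def _categorize_by_jumps(jump_distances, all_target_systems):
--     thresholds = [1, 2, 3, 4, 5, 10, 20, 30, 40]
--     bands = [[] for _ in thresholds]
--     for system_id, jumps in jump_distances.items():
--         i = next((k for k, t in enumerate(thresholds) if jumps <= t), None)
--         if i is not None:
--             bands[i].append(system_id)
--     result = {}
--     acc = []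
--     for t, band in zip(thresholds, bands):
--         acc = acc + band
--         result["<=%d" % t] = acc
--     result["all"] = list(all_target_systems)
--     return {k: sorted(v) for k, v in result.items()}
-- ===== Notes on version B (the rewrite author's own statement) =====
-- stated objective: alternative
-- what changed: Instead of testing each system against all nine thresholds and appending it to every matching bucket, B assigns each system to its single smallest band and then builds the nine cumulative '<=' lists by accumulating bands from the lowest threshold upward.
import Mathlib
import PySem

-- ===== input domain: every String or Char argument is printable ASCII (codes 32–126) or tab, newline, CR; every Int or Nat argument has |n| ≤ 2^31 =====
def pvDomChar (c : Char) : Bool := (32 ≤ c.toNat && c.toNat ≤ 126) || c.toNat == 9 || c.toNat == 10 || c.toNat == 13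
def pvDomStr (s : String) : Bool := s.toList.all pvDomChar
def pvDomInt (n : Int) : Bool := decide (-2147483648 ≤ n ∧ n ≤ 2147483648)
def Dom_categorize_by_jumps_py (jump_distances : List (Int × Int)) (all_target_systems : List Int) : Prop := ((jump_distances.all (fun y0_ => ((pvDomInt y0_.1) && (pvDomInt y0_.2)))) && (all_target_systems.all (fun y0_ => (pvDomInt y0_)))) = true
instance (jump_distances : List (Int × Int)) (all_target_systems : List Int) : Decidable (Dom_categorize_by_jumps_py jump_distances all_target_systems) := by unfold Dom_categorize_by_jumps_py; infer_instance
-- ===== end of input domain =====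

-- B replaces A's nine independent threshold tests per system by a single smallest-band
-- assignment followed by cumulative accumulation of the bands (alternative decomposition,
-- similar cost).

-- ===== PORT A =====
-- the fixed-key result dict is held as a structure of its nine "<=" lists; each loop
-- iteration performs the nine `if jumps <= t` tests in A's order, each appending to its list
structure RA where
  le1 : List Int
  le2 : List Int
  le3 : List Int
  le4 : List Int
  le5 : List Int
  le10 : List Int
  le20 : List Int
  le30 : List Int
  le40 : List Int
deriving Repr, DecidableEq

def stepA (r : RA) (p : Int × Int) : RA :=
  { le1 := if p.2 ≤ 1 then r.le1 ++ [p.1] else r.le1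
    le2 := if p.2 ≤ 2 then r.le2 ++ [p.1] else r.le2
    le3 := if p.2 ≤ 3 then r.le3 ++ [p.1] else r.le3
    le4 := if p.2 ≤ 4 then r.le4 ++ [p.1] else r.le4
    le5 := if p.2 ≤ 5 then r.le5 ++ [p.1] else r.le5
    le10 := if p.2 ≤ 10 then r.le10 ++ [p.1] else r.le10
    le20 := if p.2 ≤ 20 then r.le20 ++ [p.1] else r.le20
    le30 := if p.2 ≤ 30 then r.le30 ++ [p.1] else r.le30
    le40 := if p.2 ≤ 40 then r.le40 ++ [p.1] else r.le40 }

def categorize_by_jumps_py (jump_distances : List (Int × Int)) (all_target_systems : List Int) : List (String × List Int) :=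
  let r := jump_distances.foldl stepA ⟨[], [], [], [], [], [], [], [], []⟩
  -- final loop: every value (including "all" = list(all_target_systems)) is sorted in place
  [("<=1", PySem.List.sorted r.le1 (fun x => x) false),
   ("<=2", PySem.List.sorted r.le2 (fun x => x) false),
   ("<=3", PySem.List.sorted r.le3 (fun x => x) false),
   ("<=4", PySem.List.sorted r.le4 (fun x => x) false),
   ("<=5", PySem.List.sorted r.le5 (fun x => x) false),
   ("<=10", PySem.List.sorted r.le10 (fun x => x) false),
   ("<=20", PySem.List.sorted r.le20 (fun x => x) false),
   ("<=30", PySem.List.sorted r.le30 (fun x => x) false),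
   ("<=40", PySem.List.sorted r.le40 (fun x => x) false),
   ("all", PySem.List.sorted all_target_systems (fun x => x) false)]

-- ===== PORT B =====
def pvThresholds : List Int := [1, 2, 3, 4, 5, 10, 20, 30, 40]

-- next((k for k, t in enumerate(thresholds) if jumps <= t), None)
def pvBandIdx (jumps : Int) : Option Nat := pvThresholds.findIdx? (fun t => jumps ≤ t)

def stepB (bands : List (List Int)) (p : Int × Int) : List (List Int) :=
  match pvBandIdx p.2 with
  | none => bands
  | some i => bands.set i (bands.getD i [] ++ [p.1])

def categorize_by_jumps_py_alt (jump_distances : List (Int × Int)) (all_target_systems : List Int) : List (String × List Int) :=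
  let bands := jump_distances.foldl stepB (List.replicate 9 [])
  let cum := (pvThresholds.zip bands).foldl
      (fun (st : List Int × List (String × List Int)) tb =>
        let acc := st.1 ++ tb.2
        (acc, st.2 ++ [("<=" ++ PySem.Int.toStr tb.1, acc)])) ([], [])
  let result := cum.2 ++ [("all", all_target_systems)]
  result.map (fun kv => (kv.1, PySem.List.sorted kv.2 (fun x => x) false))

-- ===== PRECONDITION & SPEC =====
def Spec_categorize_by_jumps_py (jump_distances : List (Int × Int)) (all_target_systems : List Int) (out : List (String × List Int)) : Prop := out = categorize_by_jumps_py_alt jump_distances all_target_systems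
instance (jump_distances : List (Int × Int)) (all_target_systems : List Int) (out : List (String × List Int)) : Decidable (Spec_categorize_by_jumps_py jump_distances all_target_systems out) := by unfold Spec_categorize_by_jumps_py; infer_instance

-- ===== CLAIM (what is proved, stated in full; the proofs are below) =====
def Claim_equal_categorize_by_jumps_py : Prop := ∀ (jump_distances : List (Int × Int)) (all_target_systems : List Int), Dom_categorize_by_jumps_py jump_distances all_target_systems → Spec_categorize_by_jumps_py jump_distances all_target_systems (categorize_by_jumps_py jump_distances all_target_systems)

-- ===== LEMMAS AND PROOFS =====

theorem comp_lem {β : Type} (c : Prop) [Decidable c] (a : List β) (y : β) (t : List β) :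
    (if c then a ++ [y] else a) ++ t = a ++ (if c then y :: t else t) := by
  split_ifs <;> simp

-- closed form for A's loop state
theorem foldl_stepA_closed (l : List (Int × Int)) (r : RA) :
    (l.foldl stepA r) =
      ⟨r.le1 ++ (l.filter (fun p => decide (p.2 ≤ 1))).map (·.1),
       r.le2 ++ (l.filter (fun p => decide (p.2 ≤ 2))).map (·.1),
       r.le3 ++ (l.filter (fun p => decide (p.2 ≤ 3))).map (·.1),
       r.le4 ++ (l.filter (fun p => decide (p.2 ≤ 4))).map (·.1),
       r.le5 ++ (l.filter (fun p => decide (p.2 ≤ 5))).map (·.1),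
       r.le10 ++ (l.filter (fun p => decide (p.2 ≤ 10))).map (·.1),
       r.le20 ++ (l.filter (fun p => decide (p.2 ≤ 20))).map (·.1),
       r.le30 ++ (l.filter (fun p => decide (p.2 ≤ 30))).map (·.1),
       r.le40 ++ (l.filter (fun p => decide (p.2 ≤ 40))).map (·.1)⟩ := by
  induction l generalizing r with
  | nil => simp
  | cons x xs ih =>
    simp only [List.foldl_cons, ih, stepA, RA.mk.injEq, List.filter_cons,
      decide_eq_true_eq]
    refine ⟨?_, ?_, ?_, ?_, ?_, ?_, ?_, ?_, ?_⟩ <;>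
      · rw [comp_lem]; split_ifs <;> simp

-- stepB preserves the number of bands
theorem length_foldl_stepB (l : List (Int × Int)) (bands : List (List Int)) :
    (l.foldl stepB bands).length = bands.length := by
  induction l generalizing bands with
  | nil => rfl
  | cons x xs ih =>
    simp only [List.foldl_cons, ih, stepB]
    cases pvBandIdx x.2 <;> simp

-- closed form for B's bands
theorem foldl_stepB_closed (l : List (Int × Int)) (bands : List (List Int)) (i : Nat)
    (hi : i < bands.length) (h9 : 9 ≤ bands.length) :
    (l.foldl stepB bands).getD i [] =
      bands.getD i [] ++ (l.filter (fun p => pvBandIdx p.2 == some i)).map (·.1) := by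
  induction l generalizing bands with
  | nil => simp
  | cons x xs ih =>
    simp only [List.foldl_cons, List.filter_cons]
    by_cases hx : pvBandIdx x.2 == some i
    · have hx' : pvBandIdx x.2 = some i := by simpa using hx
      rw [show stepB bands x = bands.set i (bands.getD i [] ++ [x.1]) by
            simp [stepB, hx']]
      rw [ih _ (by simpa using hi) (by simpa using h9)]
      simp [hx, List.getD, List.getElem?_set_self (by omega)]
    · have : stepB bands x = bands ∨
          ∃ j, j ≠ i ∧ stepB bands x = bands.set j (bands.getD j [] ++ [x.1]) := by
        unfold stepB
        cases hj : pvBandIdx x.2 with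
        | none => exact Or.inl rfl
        | some j =>
          refine Or.inr ⟨j, ?_, rfl⟩
          intro h; subst h; simp [hj] at hx
      rcases this with h | ⟨j, hji, h⟩
      · rw [h, ih _ hi h9]; simp [hx]
      · rw [h, ih _ (by simpa using hi) (by simpa using h9)]
        simp [hx, List.getD, List.getElem?_set_ne (by omega)]

-- a length-9 list of lists is a 9-tuple
theorem exists_nine (B : List (List Int)) (h : B.length = 9) :
    ∃ b0 b1 b2 b3 b4 b5 b6 b7 b8, B = [b0, b1, b2, b3, b4, b5, b6, b7, b8] := by
  match B, h with
  | [b0, b1, b2, b3, b4, b5, b6, b7, b8], _ =>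
    exact ⟨b0, b1, b2, b3, b4, b5, b6, b7, b8, rfl⟩

-- disjoint filters concatenate to the filter of the disjunction, up to permutation
theorem filter_union_perm {α : Type} (p q r : α → Bool)
    (h : ∀ x, r x = (p x || q x)) (hd : ∀ x, ¬(p x = true ∧ q x = true)) :
    ∀ l : List α, (l.filter p ++ l.filter q).Perm (l.filter r) := by
  intro l
  induction l with
  | nil => simp
  | cons x xs ih =>
    by_cases hp : p x
    · have hq : q x = false := by
        by_cases hq : q x
        · exact absurd ⟨hp, hq⟩ (hd x)
        · simpa using hq
      simp only [List.filter_cons, hp, h, hq, if_true, Bool.true_or]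
      simpa using ih.cons x
    · by_cases hq : q x
      · simp only [List.filter_cons, h, hq, if_true]
        simp only [hp, Bool.false_or]
        exact List.Perm.trans List.perm_middle (ih.cons x)
      · simp only [List.filter_cons, h]
        simp [hp, hq, ih]

-- explicit characterization of the band index
theorem pvBandIdx_eq (x : Int) :
    pvBandIdx x =
      if x ≤ 1 then some 0 else if x ≤ 2 then some 1 else if x ≤ 3 then some 2
      else if x ≤ 4 then some 3 else if x ≤ 5 then some 4 else if x ≤ 10 then some 5
      else if x ≤ 20 then some 6 else if x ≤ 30 then some 7 else if x ≤ 40 then some 8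
      else none := by
  simp only [pvBandIdx, pvThresholds, List.findIdx?_cons, List.findIdx?_nil,
    decide_eq_true_eq]
  split_ifs <;> simp_all

-- pointwise: "jumps ≤ t_k" is "jumps ≤ t_{k-1} or band k", and the two are disjoint
theorem band_step (k : Nat) (tp t : Int) (hle : tp ≤ t)
    (h : ∀ x : Int, (pvBandIdx x == some k) = (decide (tp < x) && decide (x ≤ t)))
    (l : List (Int × Int)) :
    ((l.filter (fun p => decide (p.2 ≤ tp)) ++ l.filter (fun p => pvBandIdx p.2 == some k))).Perm
      (l.filter (fun p => decide (p.2 ≤ t))) := by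
  refine filter_union_perm _ _ _ ?_ ?_ l
  · intro p
    have := h p.2
    simp only [this]
    by_cases h1 : p.2 ≤ tp <;> by_cases h2 : p.2 ≤ t <;> simp_all
    omega
  · intro p
    have := h p.2
    simp only [this]
    intro ⟨h1, h2⟩
    simp at h1 h2
    omega

theorem band0_eq (l : List (Int × Int)) :
    l.filter (fun p => pvBandIdx p.2 == some 0) = l.filter (fun p => decide (p.2 ≤ 1)) := by
  apply List.filter_congr
  intro p _
  simp only [pvBandIdx_eq]
  split_ifs <;> simp_all

theorem bandChar1 (x : Int) : (pvBandIdx x == some 1) = (decide ((1 : Int) < x) && decide (x ≤ 2)) := by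
  simp only [pvBandIdx_eq]
  split_ifs <;> simp_all

theorem bandChar2 (x : Int) : (pvBandIdx x == some 2) = (decide ((2 : Int) < x) && decide (x ≤ 3)) := by
  simp only [pvBandIdx_eq]
  split_ifs <;> simp_all <;> omega

theorem bandChar3 (x : Int) : (pvBandIdx x == some 3) = (decide ((3 : Int) < x) && decide (x ≤ 4)) := by
  simp only [pvBandIdx_eq]
  split_ifs <;> simp_all <;> omega

theorem bandChar4 (x : Int) : (pvBandIdx x == some 4) = (decide ((4 : Int) < x) && decide (x ≤ 5)) := by
  simp only [pvBandIdx_eq]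
  split_ifs <;> simp_all <;> omega

theorem bandChar5 (x : Int) : (pvBandIdx x == some 5) = (decide ((5 : Int) < x) && decide (x ≤ 10)) := by
  simp only [pvBandIdx_eq]
  split_ifs <;> simp_all <;> omega

theorem bandChar6 (x : Int) : (pvBandIdx x == some 6) = (decide ((10 : Int) < x) && decide (x ≤ 20)) := by
  simp only [pvBandIdx_eq]
  split_ifs <;> simp_all <;> omega

theorem bandChar7 (x : Int) : (pvBandIdx x == some 7) = (decide ((20 : Int) < x) && decide (x ≤ 30)) := by
  simp only [pvBandIdx_eq]
  split_ifs <;> simp_all <;> omega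

theorem bandChar8 (x : Int) : (pvBandIdx x == some 8) = (decide ((30 : Int) < x) && decide (x ≤ 40)) := by
  simp only [pvBandIdx_eq]
  split_ifs <;> simp_all <;> omega

-- ===== VERDICT (by name: the statement is the Claim_ definition above) =====
theorem categorize_by_jumps_py_spec : Claim_equal_categorize_by_jumps_py := by
  intro jd ats _
  show categorize_by_jumps_py jd ats = categorize_by_jumps_py_alt jd ats
  obtain ⟨b0, b1, b2, b3, b4, b5, b6, b7, b8, hB⟩ :=
    exists_nine (jd.foldl stepB (List.replicate 9 [])) (by simp [length_foldl_stepB])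
  have hb : ∀ k, k < 9 → List.getD [b0, b1, b2, b3, b4, b5, b6, b7, b8] k [] =
      (jd.filter (fun p => pvBandIdx p.2 == some k)).map (·.1) := by
    intro k hk
    rw [← hB, foldl_stepB_closed _ _ _ (by simpa using hk) (by simp)]
    have hrep : (List.replicate 9 ([] : List Int)).getD k [] = [] := by
      interval_cases k <;> rfl
    rw [hrep, List.nil_append]
  have h0 : b0 = (jd.filter (fun p => pvBandIdx p.2 == some 0)).map (·.1) := by
    simpa using hb 0 (by omega)
  have h1 : b1 = (jd.filter (fun p => pvBandIdx p.2 == some 1)).map (·.1) := by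
    simpa using hb 1 (by omega)
  have h2 : b2 = (jd.filter (fun p => pvBandIdx p.2 == some 2)).map (·.1) := by
    simpa using hb 2 (by omega)
  have h3 : b3 = (jd.filter (fun p => pvBandIdx p.2 == some 3)).map (·.1) := by
    simpa using hb 3 (by omega)
  have h4 : b4 = (jd.filter (fun p => pvBandIdx p.2 == some 4)).map (·.1) := by
    simpa using hb 4 (by omega)
  have h5 : b5 = (jd.filter (fun p => pvBandIdx p.2 == some 5)).map (·.1) := by
    simpa using hb 5 (by omega)
  have h6 : b6 = (jd.filter (fun p => pvBandIdx p.2 == some 6)).map (·.1) := by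
    simpa using hb 6 (by omega)
  have h7 : b7 = (jd.filter (fun p => pvBandIdx p.2 == some 7)).map (·.1) := by
    simpa using hb 7 (by omega)
  have h8 : b8 = (jd.filter (fun p => pvBandIdx p.2 == some 8)).map (·.1) := by
    simpa using hb 8 (by omega)
  have A1 : ((jd.filter (fun p => pvBandIdx p.2 == some 0)) ++ (jd.filter (fun p => pvBandIdx p.2 == some 1))).Perm (jd.filter (fun p => decide (p.2 ≤ 2))) := by
    rw [band0_eq]
    exact band_step 1 1 2 (by omega) bandChar1 jd
  have A2 := (A1.append_right (jd.filter (fun p => pvBandIdx p.2 == some 2))).trans (band_step 2 2 3 (by omega) bandChar2 jd)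
  have A3 := (A2.append_right (jd.filter (fun p => pvBandIdx p.2 == some 3))).trans (band_step 3 3 4 (by omega) bandChar3 jd)
  have A4 := (A3.append_right (jd.filter (fun p => pvBandIdx p.2 == some 4))).trans (band_step 4 4 5 (by omega) bandChar4 jd)
  have A5 := (A4.append_right (jd.filter (fun p => pvBandIdx p.2 == some 5))).trans (band_step 5 5 10 (by omega) bandChar5 jd)
  have A6 := (A5.append_right (jd.filter (fun p => pvBandIdx p.2 == some 6))).trans (band_step 6 10 20 (by omega) bandChar6 jd)
  have A7 := (A6.append_right (jd.filter (fun p => pvBandIdx p.2 == some 7))).trans (band_step 7 20 30 (by omega) bandChar7 jd)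
  have A8 := (A7.append_right (jd.filter (fun p => pvBandIdx p.2 == some 8))).trans (band_step 8 30 40 (by omega) bandChar8 jd)
  simp only [categorize_by_jumps_py, categorize_by_jumps_py_alt]
  rw [foldl_stepA_closed, hB, h0, h1, h2, h3, h4, h5, h6, h7, h8]
  simp only [pvThresholds, List.zip_cons_cons, List.zip_nil_right, List.foldl_cons,
    List.foldl_nil, List.cons_append, List.nil_append, List.append_assoc,
    List.map_cons, List.map_nil, ← List.map_append]
  simp only [List.append_assoc] at A2 A3 A4 A5 A6 A7 A8
  simp only [List.cons.injEq, Prod.mk.injEq, and_true]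
  refine ⟨⟨by decide, ?_⟩, ⟨by decide, ?_⟩, ⟨by decide, ?_⟩, ⟨by decide, ?_⟩, ⟨by decide, ?_⟩,
    ⟨by decide, ?_⟩, ⟨by decide, ?_⟩, ⟨by decide, ?_⟩, by decide, ?_⟩
  · rw [band0_eq]
  · exact PySem.List.sorted_eq_sorted_of_perm _ _ _ (fun a b h => h) (A1.symm.map (·.1))
  · exact PySem.List.sorted_eq_sorted_of_perm _ _ _ (fun a b h => h) (A2.symm.map (·.1))
  · exact PySem.List.sorted_eq_sorted_of_perm _ _ _ (fun a b h => h) (A3.symm.map (·.1))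
  · exact PySem.List.sorted_eq_sorted_of_perm _ _ _ (fun a b h => h) (A4.symm.map (·.1))
  · exact PySem.List.sorted_eq_sorted_of_perm _ _ _ (fun a b h => h) (A5.symm.map (·.1))
  · exact PySem.List.sorted_eq_sorted_of_perm _ _ _ (fun a b h => h) (A6.symm.map (·.1))
  · exact PySem.List.sorted_eq_sorted_of_perm _ _ _ (fun a b h => h) (A7.symm.map (·.1))
  · exact PySem.List.sorted_eq_sorted_of_perm _ _ _ (fun a b h => h) (A8.symm.map (·.1))
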